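-- pv_equiv track=rewrite | github.com/RajkumarYadav777/Dsa_Patterns | TwoPointers/Lists/Easy/movezeroes.py | move_zeroes_brute1
-- ===== SOURCE A (Python) =====
-- def move_zeroes_brute1(nums):
--     zeroes = []
--     non_zeroes = []
--
--     for item in nums:
--         if item > 0:
--             non_zeroes.append(item)
--         else:
--             zeroes.append(item)
--     return non_zeroes + zeroes
-- ===== SOURCE B (Python) =====
-- def move_zeroes_brute1(nums):
--     return sorted(nums, key=lambda x: 0 if x > 0 else 1)
-- ===== Notes on version B (the rewrite author's own statement) =====
-- stated objective: idiomatic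
-- what changed: Replaces the two explicit accumulator lists and final concatenation with a single stable sort on the partition key (0 for positives, 1 otherwise); stability preserves the relative order, giving the identical result.
import Mathlib
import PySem

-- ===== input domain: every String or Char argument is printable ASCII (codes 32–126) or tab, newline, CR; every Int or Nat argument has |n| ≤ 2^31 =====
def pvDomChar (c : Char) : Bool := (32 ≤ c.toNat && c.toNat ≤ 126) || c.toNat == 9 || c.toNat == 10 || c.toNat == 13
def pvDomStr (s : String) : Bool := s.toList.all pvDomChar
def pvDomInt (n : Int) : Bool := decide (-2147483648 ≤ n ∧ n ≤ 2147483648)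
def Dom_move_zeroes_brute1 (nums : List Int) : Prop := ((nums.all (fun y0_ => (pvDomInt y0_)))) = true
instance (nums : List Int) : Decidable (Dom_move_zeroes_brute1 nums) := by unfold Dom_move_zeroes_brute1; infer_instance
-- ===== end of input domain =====

-- B replaces A's two accumulator lists with one stable sort on the partition key (more idiomatic).


-- ===== PORT A =====
-- for item in nums: append to non_zeroes if item > 0 else to zeroes; return non_zeroes + zeroes
def move_zeroes_brute1 (nums : List Int) : List Int :=
  let st := nums.foldl
    (fun (st : List Int × List Int) item =>
      if item > 0 then (st.1, st.2 ++ [item]) else (st.1 ++ [item], st.2))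
    ([], [])
  st.2 ++ st.1

-- ===== PORT B =====
-- return sorted(nums, key=lambda x: 0 if x > 0 else 1)
def move_zeroes_brute1_alt (nums : List Int) : List Int :=
  PySem.List.sorted nums (fun x => if x > 0 then (0 : Int) else 1)

-- ===== PRECONDITION & SPEC =====
def Spec_move_zeroes_brute1 (nums : List Int) (out : List Int) : Prop := out = move_zeroes_brute1_alt nums
instance (nums : List Int) (out : List Int) : Decidable (Spec_move_zeroes_brute1 nums out) := by unfold Spec_move_zeroes_brute1; infer_instance

-- ===== CLAIM (what is proved, stated in full; the proofs are below) =====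
def Claim_equal_move_zeroes_brute1 : Prop := ∀ (nums : List Int), Dom_move_zeroes_brute1 nums → Spec_move_zeroes_brute1 nums (move_zeroes_brute1 nums)

-- ===== LEMMAS AND PROOFS =====

def pvKey : Int → Int := fun x => if x > 0 then (0 : Int) else 1

def pvIns : Int → List Int → List Int :=
  PySem.List.insertBy (fun a b => decide (pvKey a < pvKey b))

-- a non-positive element is inserted at the very end
theorem pvIns_nonpos (x : Int) (hx : ¬ x > 0) : ∀ L : List Int, pvIns x L = L ++ [x] := by
  intro L
  induction L with
  | nil => simp [pvIns, PySem.List.insertBy]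
  | cons y ys ih =>
    have : ¬ (pvKey x < pvKey y) := by
      simp only [pvKey, if_neg hx]
      split <;> omega
    simp [pvIns, PySem.List.insertBy, this] at *
    exact ih

-- a positive element is inserted between the positives and the non-positives
theorem pvIns_pos (x : Int) (hx : x > 0) :
    ∀ (P Z : List Int), (∀ p ∈ P, p > 0) → (∀ z ∈ Z, ¬ z > 0) →
    pvIns x (P ++ Z) = P ++ x :: Z := by
  intro P
  induction P with
  | nil =>
    intro Z _ hZ
    cases Z with
    | nil => simp [pvIns, PySem.List.insertBy]
    | cons z zs =>
      have hz : ¬ z > 0 := hZ z (by simp)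
      have : pvKey x < pvKey z := by simp [pvKey, if_pos hx, if_neg hz]
      simp [pvIns, PySem.List.insertBy, this]
  | cons p ps ih =>
    intro Z hP hZ
    have hp : p > 0 := hP p (by simp)
    have : ¬ (pvKey x < pvKey p) := by simp [pvKey, if_pos hx, if_pos hp]
    simp only [List.cons_append, pvIns, PySem.List.insertBy, this, decide_false,
      Bool.false_eq_true, if_false]
    have := ih Z (fun q hq => hP q (by simp [hq])) hZ
    simpa [pvIns] using this

-- loop invariant: A's two-accumulator fold matches B's insertion-sort fold
theorem pvInvariant : ∀ (nums Z P : List Int),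
    (∀ p ∈ P, p > 0) → (∀ z ∈ Z, ¬ z > 0) →
    (let st := nums.foldl
        (fun (st : List Int × List Int) item =>
          if item > 0 then (st.1, st.2 ++ [item]) else (st.1 ++ [item], st.2))
        (Z, P)
     st.2 ++ st.1) = nums.foldl (fun acc x => pvIns x acc) (P ++ Z) := by
  intro nums
  induction nums with
  | nil => intro Z P _ _; simp
  | cons x rest ih =>
    intro Z P hP hZ
    by_cases hx : x > 0
    · have h1 := ih Z (P ++ [x])
        (by intro q hq; rcases List.mem_append.mp hq with h | h
            · exact hP q h
            · simp at h; omega) hZ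
      simp only [List.foldl_cons, if_pos hx]
      rw [h1, pvIns_pos x hx P Z hP hZ]
      simp
    · have h1 := ih (Z ++ [x]) P hP
        (by intro q hq; rcases List.mem_append.mp hq with h | h
            · exact hZ q h
            · simp at h; omega)
      simp only [List.foldl_cons, if_neg hx]
      rw [h1, pvIns_nonpos x hx (P ++ Z)]
      simp

-- ===== VERDICT (by name: the statement is the Claim_ definition above) =====
theorem move_zeroes_brute1_spec : Claim_equal_move_zeroes_brute1 := by
  intro nums _
  show move_zeroes_brute1 nums = move_zeroes_brute1_alt nums
  rw [move_zeroes_brute1_alt, PySem.List.sorted_eq_foldl_insertBy]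
  have := pvInvariant nums [] [] (by simp) (by simp)
  simpa [move_zeroes_brute1, pvIns, pvKey] using this
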